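-- pv_equiv track=rewrite | github.com/VuBui217/dailycodingchallenge | 2025/october/password_strength.py | contain_uppercase_lowercase
-- ===== SOURCE A (Python) =====
-- def contain_uppercase_lowercase(password):
--     isUpper = False
--     isLower = False
--     for ch in password:
--         if ch.isupper():
--             isUpper = True
--         elif ch.islower():
--             isLower = True
--     return isUpper and isLower
-- ===== SOURCE B (Python) =====
-- def contain_uppercase_lowercase(password):
--     # Case-mapping comparison: lowercasing changes the string iff it held an
--     # uppercase letter, uppercasing changes it iff it held a lowercase one.
--     return password != password.lower() and password != password.upper()
-- ===== Notes on version B (the rewrite author's own statement) =====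
-- stated objective: faster
-- what changed: Replaced A's per-character flag-setting loop with a loop-free case-mapping comparison: the string contains an uppercase letter iff it differs from its lower() image and a lowercase letter iff it differs from its upper() image.
import Mathlib
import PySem

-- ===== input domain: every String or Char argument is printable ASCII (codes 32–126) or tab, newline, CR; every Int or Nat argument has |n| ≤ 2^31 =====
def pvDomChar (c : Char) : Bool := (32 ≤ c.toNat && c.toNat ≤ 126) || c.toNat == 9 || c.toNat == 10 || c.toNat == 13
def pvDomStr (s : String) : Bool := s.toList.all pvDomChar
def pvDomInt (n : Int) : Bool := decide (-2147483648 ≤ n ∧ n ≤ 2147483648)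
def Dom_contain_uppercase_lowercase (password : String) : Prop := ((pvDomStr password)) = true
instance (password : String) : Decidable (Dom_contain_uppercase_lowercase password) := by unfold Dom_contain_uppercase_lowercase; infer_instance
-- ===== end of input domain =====

-- B replaces A's flag-setting character loop by a loop-free case-mapping comparison
-- (s differs from s.lower() iff it holds an uppercase letter, from s.upper() iff a lowercase one); measured faster by a constant factor (bulk case-mapping instead of a per-character Python loop).

-- ===== PORT A =====
def contain_uppercase_lowercase (password : String) : Bool :=
  let st := password.toList.foldl
    (fun (st : Bool × Bool) ch =>
      if PySem.Chars.isupper ch then (true, st.2)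
      else if PySem.Chars.islower ch then (st.1, true)
      else st)
    (false, false)
  st.1 && st.2

-- ===== PORT B =====
def contain_uppercase_lowercase_alt (password : String) : Bool :=
  (password != PySem.Str.lower password) && (password != PySem.Str.upper password)

-- ===== PRECONDITION & SPEC =====
def Spec_contain_uppercase_lowercase (password : String) (out : Bool) : Prop := out = contain_uppercase_lowercase_alt password
instance (password : String) (out : Bool) : Decidable (Spec_contain_uppercase_lowercase password out) := by unfold Spec_contain_uppercase_lowercase; infer_instance

-- ===== CLAIM (what is proved, stated in full; the proofs are below) =====
def Claim_equal_contain_uppercase_lowercase : Prop := ∀ (password : String), Dom_contain_uppercase_lowercase password → Spec_contain_uppercase_lowercase password (contain_uppercase_lowercase password)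

-- ===== LEMMAS AND PROOFS =====

-- An ASCII character is never both upper- and lowercase, so A's elif never hides a lowercase hit.
theorem upper_not_lower (c : Char) : PySem.Chars.isupper c = true → PySem.Chars.islower c = false := by
  simp only [PySem.Chars.isupper, PySem.Chars.islower, Bool.and_eq_true, Bool.and_eq_false_iff,
    decide_eq_true_iff, decide_eq_false_iff_not]
  rintro ⟨h1, h2⟩
  left
  intro h
  exact absurd (h.trans h2) (by decide)

-- A's loop computes exactly (u || any isupper, l || any islower) from initial flags (u, l).
theorem loop_eq (cs : List Char) (u l : Bool) :
    cs.foldl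
      (fun (st : Bool × Bool) ch =>
        if PySem.Chars.isupper ch then (true, st.2)
        else if PySem.Chars.islower ch then (st.1, true)
        else st)
      (u, l)
    = (u || cs.any PySem.Chars.isupper, l || cs.any PySem.Chars.islower) := by
  induction cs generalizing u l with
  | nil => simp
  | cons c cs ih =>
    simp only [List.foldl_cons, List.any_cons]
    by_cases h : PySem.Chars.isupper c = true
    · have hl := upper_not_lower c h
      simp [h, hl, ih]
    · simp only [Bool.not_eq_true] at h
      by_cases h2 : PySem.Chars.islower c = true
      · simp [h, h2, ih]
      · simp only [Bool.not_eq_true] at h2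
        simp [h, h2, ih]

-- lowerChar fixes c exactly when c is not uppercase.
theorem lowerChar_eq_self_iff (c : Char) :
    (PySem.Chars.lowerChar c = c) ↔ PySem.Chars.isupper c = false := by
  unfold PySem.Chars.lowerChar
  by_cases h : PySem.Chars.isupper c = true
  · have hb : 'A' ≤ c ∧ c ≤ 'Z' := by
      simpa [PySem.Chars.isupper] using h
    have hle : c.toNat ≤ 90 := by
      have h2 := hb.2
      rw [Char.le_def, UInt32.le_iff_toNat_le] at h2
      exact h2
    simp only [h, if_true]
    constructor
    · intro he
      exfalso
      have hv : Nat.isValidChar (c.toNat + 32) := Or.inl (by omega)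
      have ht : (Char.ofNat (c.toNat + 32)).toNat = c.toNat + 32 := by
        rw [Char.toNat_ofNat, if_pos hv]
      rw [he] at ht
      omega
    · intro hf
      exact absurd hf (by decide)
  · simp only [Bool.not_eq_true] at h
    simp [h]

-- upperChar fixes c exactly when c is not lowercase.
theorem upperChar_eq_self_iff (c : Char) :
    (PySem.Chars.upperChar c = c) ↔ PySem.Chars.islower c = false := by
  unfold PySem.Chars.upperChar
  by_cases h : PySem.Chars.islower c = true
  · have hb : 'a' ≤ c ∧ c ≤ 'z' := by
      simpa [PySem.Chars.islower] using h
    have hge : 97 ≤ c.toNat := by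
      have h2 := hb.1
      rw [Char.le_def, UInt32.le_iff_toNat_le] at h2
      exact h2
    have hle : c.toNat ≤ 122 := by
      have h2 := hb.2
      rw [Char.le_def, UInt32.le_iff_toNat_le] at h2
      exact h2
    simp only [h, if_true]
    constructor
    · intro he
      exfalso
      have hv : Nat.isValidChar (c.toNat - 32) := Or.inl (by omega)
      have ht : (Char.ofNat (c.toNat - 32)).toNat = c.toNat - 32 := by
        rw [Char.toNat_ofNat, if_pos hv]
      rw [he] at ht
      omega
    · intro hf
      exact absurd hf (by decide)
  · simp only [Bool.not_eq_true] at h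
    simp [h]

-- A map by a function agrees with the identity exactly when it fixes every element.
theorem map_eq_self_iff_fix {α : Type} (f : α → α) (l : List α) :
    l.map f = l ↔ ∀ a ∈ l, f a = a := by
  induction l with
  | nil => simp
  | cons x xs ih => simp [ih]

-- The string equals its lower() image iff no character is uppercase.
theorem eq_lower_iff (s : String) :
    (s = PySem.Str.lower s) ↔ s.toList.any PySem.Chars.isupper = false := by
  rw [← String.toList_inj, PySem.Str.toList_lower]
  unfold PySem.Chars.lower
  rw [eq_comm, map_eq_self_iff_fix, List.any_eq_false]
  constructor <;> intro h c hc
  · simpa using (lowerChar_eq_self_iff c).1 (h c hc)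
  · exact (lowerChar_eq_self_iff c).2 (by simpa using h c hc)

-- The string equals its upper() image iff no character is lowercase.
theorem eq_upper_iff (s : String) :
    (s = PySem.Str.upper s) ↔ s.toList.any PySem.Chars.islower = false := by
  rw [← String.toList_inj, PySem.Str.toList_upper]
  unfold PySem.Chars.upper
  rw [eq_comm, map_eq_self_iff_fix, List.any_eq_false]
  constructor <;> intro h c hc
  · simpa using (upperChar_eq_self_iff c).1 (h c hc)
  · exact (upperChar_eq_self_iff c).2 (by simpa using h c hc)

-- ===== VERDICT (by name: the statement is the Claim_ definition above) =====
theorem contain_uppercase_lowercase_spec : Claim_equal_contain_uppercase_lowercase := by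
  intro password _
  unfold Spec_contain_uppercase_lowercase contain_uppercase_lowercase contain_uppercase_lowercase_alt
  simp only [loop_eq, Bool.false_or]
  rcases hu : password.toList.any PySem.Chars.isupper with _ | _ <;>
  rcases hl : password.toList.any PySem.Chars.islower with _ | _ <;>
    simp [eq_lower_iff, eq_upper_iff, hu, hl]
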